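-- pv_equiv track=rewrite | github.com/bavalpey/codefights | core/listBackwoods/swapDiagonals.py | swapDiagonals
-- ===== SOURCE A (Python) =====
-- def swapDiagonals(matrix):
--     diag1 = []
--     diag2 = []
--     for row in range(len(matrix)):
--         for col in range(len(matrix[0])):
--             if row == col:
--                 diag1.append(matrix[row][col])
--                 diag2.append(matrix[::-1][row][col])
--     diag2 = diag2[::-1]
--     diag1 = diag1[::-1]
--     for row in range(len(matrix)):
--         for col in range(len(matrix[0])):
--             if row == col:
--                 matrix[row][col] = diag2[row]
--                 matrix[::-1][row][col] = diag1[row]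
--     return matrix
-- ===== SOURCE B (Python) =====
-- def swapDiagonals(matrix):
--     n = len(matrix)
--     for i in range(n):
--         matrix[i][i], matrix[i][n - 1 - i] = matrix[i][n - 1 - i], matrix[i][i]
--     return matrix
-- ===== Notes on version B (the rewrite author's own statement) =====
-- stated objective: faster
-- what changed: A runs two n*m double loops that build both diagonal lists (re-slicing matrix[::-1] inside the inner loop), reverses them and writes them back; B swaps the two diagonal entries of each row directly in one O(n) pass with no diagonal lists, no reversals and no column loop. Pre_ excludes matrices with a row shorter than the number of rows, where both diagonals do not fit in every row: B naturally raises IndexError there while A sometimes returns a partial swap.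
-- outside the precondition, e.g. on swapDiagonals([[1], [2]]): A returns [[2], [1]], B raises IndexError
import Mathlib
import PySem

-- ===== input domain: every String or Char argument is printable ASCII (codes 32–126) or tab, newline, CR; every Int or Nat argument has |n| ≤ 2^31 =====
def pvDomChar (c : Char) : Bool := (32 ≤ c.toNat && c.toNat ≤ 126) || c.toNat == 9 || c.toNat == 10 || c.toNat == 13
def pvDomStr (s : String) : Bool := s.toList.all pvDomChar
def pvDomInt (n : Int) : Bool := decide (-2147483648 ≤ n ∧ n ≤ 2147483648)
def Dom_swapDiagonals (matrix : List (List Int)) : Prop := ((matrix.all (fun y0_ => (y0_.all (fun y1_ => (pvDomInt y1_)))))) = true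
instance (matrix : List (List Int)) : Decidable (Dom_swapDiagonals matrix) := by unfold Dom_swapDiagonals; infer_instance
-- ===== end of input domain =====

-- B replaces A's two n*m double loops (collect both diagonals while re-slicing matrix[::-1],
-- reverse the lists, write them back) by one O(n) pass that swaps the two diagonal entries of
-- each row directly.  Both A and B mutate the matrix's rows in place; the equivalence proved
-- here is about the return value.

-- ===== PORT A =====
def swapDiagonals (matrix : List (List Int)) : List (List Int) :=
  -- first loop: collect diag1/diag2 (one pair-valued fold, appends in source order)
  let p := (PySem.List.pyRange 0 (matrix.length : Int) 1).foldl (fun p row =>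
      (PySem.List.pyRange 0 ((PySem.List.pyGetD matrix 0 []).length : Int) 1).foldl (fun p col =>
        if row = col then
          (p.1 ++ [PySem.List.pyGetD (PySem.List.pyGetD matrix row []) col 0],
           p.2 ++ [PySem.List.pyGetD (PySem.List.pyGetD ((PySem.List.slice? matrix none none (-1)).getD []) row []) col 0])
        else p) p) ([], [])
  let diag2 := (PySem.List.slice? p.2 none none (-1)).getD []
  let diag1 := (PySem.List.slice? p.1 none none (-1)).getD []
  -- second loop: write back.  'matrix[::-1][row][col] = v' mutates the shared row object
  -- matrix[len(matrix)-1-row]; exact as a functional update at that index.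
  (PySem.List.pyRange 0 (matrix.length : Int) 1).foldl (fun mat row =>
    (PySem.List.pyRange 0 ((PySem.List.pyGetD matrix 0 []).length : Int) 1).foldl (fun mat col =>
      if row = col then
        let mat := PySem.List.pySetD mat row
          (PySem.List.pySetD (PySem.List.pyGetD mat row []) col (PySem.List.pyGetD diag2 row 0))
        let mat := PySem.List.pySetD mat ((mat.length : Int) - 1 - row)
          (PySem.List.pySetD (PySem.List.pyGetD mat ((mat.length : Int) - 1 - row) []) col (PySem.List.pyGetD diag1 row 0))
        mat
      else mat) mat) matrix

-- ===== PORT B =====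
-- for i in range(n): matrix[i][i], matrix[i][n-1-i] = matrix[i][n-1-i], matrix[i][i]
-- (tuple assignment: both right-hand sides read first, then the two writes, left to right)
def swapDiagonals_alt (matrix : List (List Int)) : List (List Int) :=
  let n : Int := matrix.length
  (PySem.List.pyRange 0 n 1).foldl (fun mat i =>
    let t0 := PySem.List.pyGetD (PySem.List.pyGetD mat i []) (n - 1 - i) 0
    let t1 := PySem.List.pyGetD (PySem.List.pyGetD mat i []) i 0
    let mat := PySem.List.pySetD mat i
      (PySem.List.pySetD (PySem.List.pyGetD mat i []) i t0)
    PySem.List.pySetD mat i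
      (PySem.List.pySetD (PySem.List.pyGetD mat i []) (n - 1 - i) t1)) matrix

-- ===== PRECONDITION & SPEC =====
-- Pre_ excludes matrices in which some row i is too short to contain both of its diagonal
-- positions i and n-1-i: B's swap naturally raises IndexError there, while A either raises too
-- or still returns an accidental partial swap (its k = min(n, len(row0)) loop skips rows).
def Pre_swapDiagonals (matrix : List (List Int)) : Prop :=
  ∀ i < matrix.length,
    i < (matrix.getD i []).length ∧ matrix.length - 1 - i < (matrix.getD i []).length
instance (matrix : List (List Int)) : Decidable (Pre_swapDiagonals matrix) := by
  unfold Pre_swapDiagonals; infer_instance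

def pvWitness_swapDiagonals : List (List Int) := [[1, 2], [3, 4]]

def Spec_swapDiagonals (matrix : List (List Int)) (out : List (List Int)) : Prop := out = swapDiagonals_alt matrix
instance (matrix : List (List Int)) (out : List (List Int)) : Decidable (Spec_swapDiagonals matrix out) := by unfold Spec_swapDiagonals; infer_instance

-- ===== CLAIM (what is proved, stated in full; the proofs are below) =====
def Claim_equal_swapDiagonals : Prop := ∀ (matrix : List (List Int)), Dom_swapDiagonals matrix → Pre_swapDiagonals matrix → Spec_swapDiagonals matrix (swapDiagonals matrix)

-- ===== LEMMAS AND PROOFS =====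

-- n := len(matrix), k := min(len(matrix), len(matrix[0])); the two values A writes at step r:
-- pvD1 k r = (reversed diag1)[r], pvD2 n k r = (reversed diag2)[r]
def pvD1 (matrix : List (List Int)) (k r : ℕ) : Int :=
  (matrix.getD (k - 1 - r) []).getD (k - 1 - r) 0
def pvD2 (matrix : List (List Int)) (n k r : ℕ) : Int :=
  (matrix.getD (n - k + r) []).getD (k - 1 - r) 0

-- state of A's write-back loop after processing rows 0..K-1, described row by row
def pvPart (matrix : List (List Int)) (n k K j : ℕ) : List Int :=
  let row := matrix.getD j []
  let row1 := if j < K ∧ j < k then row.set j (pvD2 matrix n k j) else row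
  if n - 1 - j < K ∧ n - 1 - j < k then row1.set (n - 1 - j) (pvD1 matrix k (n - 1 - j)) else row1

-- one iteration of A's write-back loop, with the inner col-loop already resolved to col = r
def pvStepA (matrix : List (List Int)) (n k : ℕ) (mat : List (List Int)) (r : ℕ) : List (List Int) :=
  if r < k then
    let m1 := mat.set r ((mat.getD r []).set r (pvD2 matrix n k r))
    let i2 : Int := (m1.length : Int) - 1 - (r : Int)
    PySem.List.pySetD m1 i2 ((PySem.List.pyGetD m1 i2 []).set r (pvD1 matrix k r))
  else mat

theorem pv_foldl_miss {a : Type} (g : Nat -> a -> a) (r m : Nat) (h : m <= r) (s : a) :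
    (List.range m).foldl (fun s c => if r = c then g c s else s) s = s := by
  induction m with
  | zero => simp
  | succ m ih =>
    rw [List.range_succ, List.foldl_append, ih (by omega)]
    simp only [List.foldl_cons, List.foldl_nil]
    rw [if_neg (by omega)]

theorem pv_foldl_hit {a : Type} (g : Nat -> a -> a) (r m : Nat) (h : r < m) (s : a) :
    (List.range m).foldl (fun s c => if r = c then g c s else s) s = g r s := by
  induction m with
  | zero => omega
  | succ m ih =>
    rw [List.range_succ, List.foldl_append]
    by_cases hrm : r = m
    · subst hrm
      rw [pv_foldl_miss g r r le_rfl]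
      simp
    · rw [ih (by omega)]
      simp [hrm]

-- each inner col-pass of a row-by-col double loop hits exactly col = row (when row < m)
theorem pv_double_hit {a : Type} (g : a -> Nat -> Nat -> a) (n m : Nat) (s : a) :
    (List.range n).foldl
      (fun s r => (List.range m).foldl (fun s c => if r = c then g s r c else s) s) s
      = (List.range n).foldl (fun s r => if r < m then g s r r else s) s := by
  apply PySem.List.foldl_congr_mem
  intro acc r _
  by_cases hrm : r < m
  · rw [pv_foldl_hit (fun c s => g s r c) r m hrm acc, if_pos hrm]
  · rw [pv_foldl_miss (fun c s => g s r c) r m (by omega) acc, if_neg hrm]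

theorem pv_foldl_pair_if {a b : Type} (f1 : Nat -> a) (f2 : Nat -> b) (m : Nat) (l : List Nat)
    (xs : List a) (ys : List b) :
    l.foldl (fun p x => if x < m then (p.1 ++ [f1 x], p.2 ++ [f2 x]) else p) (xs, ys)
      = (xs ++ (l.filter (fun x => decide (x < m))).map f1,
         ys ++ (l.filter (fun x => decide (x < m))).map f2) := by
  induction l generalizing xs ys with
  | nil => simp
  | cons z zs ih =>
    by_cases hz : z < m
    · simp [hz, ih]
    · simp [hz, ih]

theorem pv_filter_range_lt (n m : Nat) :
    (List.range n).filter (fun r => decide (r < m)) = List.range (min n m) := by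
  induction n with
  | zero => simp
  | succ n ih =>
    rw [List.range_succ, List.filter_append, ih]
    by_cases h : n < m
    · have e : min n m = n := by omega
      have e2 : min (n + 1) m = n + 1 := by omega
      simp [h, e, ← List.range_succ]
    · have e2 : min (n + 1) m = min n m := by omega
      simp [h, e2]

theorem pv_getD_reverse_map_range (f : Nat -> Int) (n k : Nat) (hk : k < n) :
    (((List.range n).map f).reverse).getD k 0 = f (n - 1 - k) := by
  rw [List.getD_eq_getElem _ _ (by simpa using hk)]
  rw [List.getElem_reverse]
  simp only [List.getElem_map, List.getElem_range, List.length_map, List.length_range]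

theorem pv_self_eq_map_range (matrix : List (List Int)) :
    (List.range matrix.length).map (fun j => matrix.getD j []) = matrix := by
  apply List.ext_getElem (by simp)
  intro i h1 h2
  simp only [List.getElem_map, List.getElem_range]
  rw [List.getD_eq_getElem _ _ h2]

theorem pv_getD_map_part (matrix : List (List Int)) (n k K j : Nat) (hj : j < n) :
    ((List.range n).map (pvPart matrix n k K)).getD j [] = pvPart matrix n k K j := by
  rw [List.getD_eq_getElem _ _ (by simpa using hj)]
  simp only [List.getElem_map, List.getElem_range]

-- matrix[::-1][r] is matrix[n-1-r]
theorem pv_getD_reverse (matrix : List (List Int)) (r : Nat) (hr : r < matrix.length) :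
    matrix.reverse.getD (matrix.length - 1 - r) [] = matrix.getD r [] := by
  rw [List.getD_eq_getElem _ _ (by simp; omega), List.getD_eq_getElem _ _ hr]
  rw [List.getElem_reverse]
  congr 1
  omega

theorem pv_step_eq (matrix : List (List Int)) (k K : Nat) (_hk : k <= matrix.length)
    (hK : K < matrix.length) :
    pvStepA matrix matrix.length k
        ((List.range matrix.length).map (pvPart matrix matrix.length k K)) K
      = (List.range matrix.length).map (pvPart matrix matrix.length k (K + 1)) := by
  by_cases hKk : K < k
  · unfold pvStepA
    rw [if_pos hKk]
    simp only [List.length_set, List.length_map, List.length_range]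
    have hcast : ((matrix.length : Int) - 1 - (K : Int)) = ((matrix.length - 1 - K : Nat) : Int) := by
      omega
    rw [hcast]
    simp only [PySem.List.pySetD_natCast, PySem.List.pyGetD_natCast]
    rw [pv_getD_map_part matrix matrix.length k K K hK]
    have hget2 : (((List.range matrix.length).map (pvPart matrix matrix.length k K)).set K
          ((pvPart matrix matrix.length k K K).set K (pvD2 matrix matrix.length k K))).getD
          (matrix.length - 1 - K) []
        = if K = matrix.length - 1 - K
          then (pvPart matrix matrix.length k K K).set K (pvD2 matrix matrix.length k K)
          else pvPart matrix matrix.length k K (matrix.length - 1 - K) := by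
      rw [List.getD_eq_getElem _ _ (by simp; omega)]
      rw [List.getElem_set]
      split_ifs with h1
      · rfl
      · simp only [List.getElem_map, List.getElem_range]
    rw [hget2]
    apply List.ext_getElem (by simp)
    intro j hj1 hj2
    simp only [List.length_map, List.length_range] at hj2
    simp only [List.getElem_set, List.getElem_map, List.getElem_range]
    by_cases hja : matrix.length - 1 - K = j
    · rw [if_pos hja]
      by_cases hjc : K = matrix.length - 1 - K
      · rw [if_pos hjc]
        have hjk : j = K := by omega
        subst hjk
        simp only [pvPart, ← hjc]
        split_ifs <;> first | rfl | omega
      · rw [if_neg hjc]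
        subst hja
        have hrr : matrix.length - 1 - (matrix.length - 1 - K) = K := by omega
        simp only [pvPart, hrr]
        split_ifs <;> first | rfl | omega
    · rw [if_neg hja]
      by_cases hjk : K = j
      · rw [if_pos hjk]
        subst hjk
        simp only [pvPart]
        split_ifs <;>
          first
            | rfl
            | omega
            | (rw [List.set_comm _ _ (by omega)])
      · rw [if_neg hjk]
        simp only [pvPart]
        split_ifs <;> first | rfl | omega
  · unfold pvStepA
    rw [if_neg hKk]
    apply List.map_congr_left
    intro j hj
    simp only [List.mem_range] at hj
    simp only [pvPart]
    split_ifs <;> first | rfl | omega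

theorem pv_key (matrix : List (List Int)) (k : Nat) (hk : k <= matrix.length) :
    forall K, K <= matrix.length ->
      (List.range K).foldl (pvStepA matrix matrix.length k) matrix
        = (List.range matrix.length).map (pvPart matrix matrix.length k K) := by
  intro K
  induction K with
  | zero =>
    intro _
    simp only [List.range_zero, List.foldl_nil]
    have : pvPart matrix matrix.length k 0 = fun j => matrix.getD j [] := by
      funext j
      simp [pvPart]
    rw [this, pv_self_eq_map_range]
  | succ K ih =>
    intro hK
    rw [List.range_succ, List.foldl_append, ih (by omega)]
    simp only [List.foldl_cons, List.foldl_nil]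
    exact pv_step_eq matrix k K hk (by omega)

theorem pv_a_eq_map (matrix : List (List Int)) :
    swapDiagonals matrix
      = (List.range matrix.length).map
          (pvPart matrix matrix.length
            (min matrix.length (matrix.getD 0 []).length) matrix.length) := by
  unfold swapDiagonals
  simp only [PySem.List.slice?_none_none_neg_one, Option.getD_some, PySem.List.pyGetD_zero]
  simp only [PySem.List.pyRange_one, sub_zero, Int.toNat_natCast, List.foldl_map, zero_add,
    Nat.cast_inj, PySem.List.pyGetD_natCast, PySem.List.pySetD_natCast]
  rw [pv_double_hit]
  rw [pv_double_hit]
  rw [pv_foldl_pair_if]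
  rw [pv_filter_range_lt]
  simp only [List.nil_append]
  -- the write-back step is pvStepA
  refine Eq.trans (PySem.List.foldl_congr_mem _ _
    (pvStepA matrix matrix.length (min matrix.length (matrix.getD 0 []).length)) _ ?_) ?_
  · intro mat r hr
    simp only [List.mem_range] at hr
    by_cases hrk : r < min matrix.length (matrix.getD 0 []).length
    · rw [if_pos (show r < (matrix.getD 0 []).length by omega)]
      rw [pv_getD_reverse_map_range _ _ _ hrk, pv_getD_reverse_map_range _ _ _ hrk]
      have hrev : matrix.reverse.getD
            (min matrix.length (matrix.getD 0 []).length - 1 - r) []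
          = matrix.getD
              (matrix.length - min matrix.length (matrix.getD 0 []).length + r) [] := by
        have h2 : min matrix.length (matrix.getD 0 []).length - 1 - r
            = matrix.length - 1
              - (matrix.length - min matrix.length (matrix.getD 0 []).length + r) := by
          omega
        rw [h2]
        exact pv_getD_reverse matrix _ (by omega)
      rw [hrev]
      simp only [pvStepA, pvD1, pvD2]
      rw [if_pos hrk]
    · rw [if_neg (show ¬ r < (matrix.getD 0 []).length by omega)]
      simp only [pvStepA]
      rw [if_neg hrk]
  · exact pv_key matrix (min matrix.length (matrix.getD 0 []).length) (by omega)
      matrix.length le_rfl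

-- ---- B side ----

-- row j of B's result: its two diagonal entries swapped once j has been processed
def pvPartB (matrix : List (List Int)) (K j : ℕ) : List Int :=
  let row := matrix.getD j []
  if j < K then
    (row.set j (row.getD (matrix.length - 1 - j) 0)).set (matrix.length - 1 - j) (row.getD j 0)
  else row

-- one iteration of B's loop (indices already in ℕ)
def pvStepB (matrix : List (List Int)) (mat : List (List Int)) (i : ℕ) : List (List Int) :=
  let t0 := (mat.getD i []).getD (matrix.length - 1 - i) 0
  let t1 := (mat.getD i []).getD i 0
  let mat1 := mat.set i ((mat.getD i []).set i t0)
  mat1.set i ((mat1.getD i []).set (matrix.length - 1 - i) t1)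

theorem pv_getD_map_partB (matrix : List (List Int)) (K j : Nat) (hj : j < matrix.length) :
    ((List.range matrix.length).map (pvPartB matrix K)).getD j [] = pvPartB matrix K j := by
  rw [List.getD_eq_getElem _ _ (by simpa using hj)]
  simp only [List.getElem_map, List.getElem_range]

theorem pv_stepB_eq (matrix : List (List Int)) (K : Nat) (hK : K < matrix.length) :
    pvStepB matrix ((List.range matrix.length).map (pvPartB matrix K)) K
      = (List.range matrix.length).map (pvPartB matrix (K + 1)) := by
  unfold pvStepB
  dsimp only
  rw [pv_getD_map_partB matrix K K hK]
  have hKK : pvPartB matrix K K = matrix.getD K [] := by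
    simp [pvPartB]
  rw [hKK]
  have hget1 : (((List.range matrix.length).map (pvPartB matrix K)).set K
        ((matrix.getD K []).set K ((matrix.getD K []).getD (matrix.length - 1 - K) 0))).getD K []
      = (matrix.getD K []).set K ((matrix.getD K []).getD (matrix.length - 1 - K) 0) := by
    rw [List.getD_eq_getElem _ _ (by simp; omega)]
    rw [List.getElem_set, if_pos rfl]
  rw [hget1]
  apply List.ext_getElem (by simp)
  intro j hj1 hj2
  simp only [List.length_map, List.length_range] at hj2
  simp only [List.getElem_set, List.getElem_map, List.getElem_range]
  by_cases hjk : K = j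
  · subst hjk
    rw [if_pos rfl]
    simp only [pvPartB]
    rw [if_pos (by omega)]
  · rw [if_neg hjk]
    simp only [pvPartB]
    split_ifs <;> first | rfl | omega

theorem pv_keyB (matrix : List (List Int)) :
    forall K, K <= matrix.length ->
      (List.range K).foldl (pvStepB matrix) matrix
        = (List.range matrix.length).map (pvPartB matrix K) := by
  intro K
  induction K with
  | zero =>
    intro _
    simp only [List.range_zero, List.foldl_nil]
    have : pvPartB matrix 0 = fun j => matrix.getD j [] := by
      funext j
      simp [pvPartB]
    rw [this, pv_self_eq_map_range]
  | succ K ih =>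
    intro hK
    rw [List.range_succ, List.foldl_append, ih (by omega)]
    simp only [List.foldl_cons, List.foldl_nil]
    exact pv_stepB_eq matrix K (by omega)

theorem pv_alt_eq_map (matrix : List (List Int)) :
    swapDiagonals_alt matrix
      = (List.range matrix.length).map (pvPartB matrix matrix.length) := by
  unfold swapDiagonals_alt
  simp only [PySem.List.pyRange_one, sub_zero, Int.toNat_natCast, List.foldl_map, zero_add]
  rw [← pv_keyB matrix matrix.length le_rfl]
  apply PySem.List.foldl_congr_mem
  intro mat i hi
  simp only [List.mem_range] at hi
  have hcast : ((matrix.length : Int) - 1 - (i : Int)) = ((matrix.length - 1 - i : Nat) : Int) := by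
    omega
  rw [hcast]
  simp only [PySem.List.pyGetD_natCast, PySem.List.pySetD_natCast]
  rfl

-- ===== VERDICT (by name: the statement is the Claim_ definition above) =====
theorem swapDiagonals_spec : Claim_equal_swapDiagonals := by
  intro matrix _ hpre
  unfold Spec_swapDiagonals
  rw [pv_a_eq_map matrix, pv_alt_eq_map matrix]
  rcases List.eq_nil_or_concat matrix with h | _
  · simp [h]
  · have hne : matrix ≠ [] := by
      rename_i hc; rcases hc with ⟨l, a, rfl⟩; simp
    have hn0 : 0 < matrix.length := List.length_pos_iff.mpr hne
    have hm : matrix.length ≤ (matrix.getD 0 []).length := by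
      have := (hpre 0 hn0).2
      omega
    have hk : min matrix.length (matrix.getD 0 []).length = matrix.length := by omega
    rw [hk]
    apply List.map_congr_left
    intro j hj
    simp only [List.mem_range] at hj
    have e1 : matrix.length - matrix.length + j = j := by omega
    have e2 : matrix.length - 1 - (matrix.length - 1 - j) = j := by omega
    simp only [pvPart, pvPartB, pvD1, pvD2, e1, e2]
    split_ifs <;> first | rfl | omega
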